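-- pv_equiv track=rewrite | github.com/Jayyxy/coding-test_python | programmers/basic/conditional/solution4_홀짝에 따라 다른 값 반환하기/main.py | solution
-- ===== SOURCE A (Python) =====
-- def solution(n):
--
--     answer = 0
--     a = 0
--
--     for i in range(n) :
--         if n % 2 != 0 :
--             answer += n - a
--         else :
--             answer += (n-a)**2
--
--         a = a+2
--
--         if a >= n :
--             break
--
--
--
--
--
--     return answer
-- ===== SOURCE B (Python) =====
-- def solution(n):
--     if n <= 0:
--         return 0
--     if n % 2:
--         k = (n + 1) // 2
--         return k * k
--     m = n // 2
--     return 2 * m * (m + 1) * (2 * m + 1) // 3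
-- ===== Notes on version B (the rewrite author's own statement) =====
-- stated objective: faster
-- what changed: Replaces the O(n) loop with closed-form formulas: ((n+1)/2)^2 for odd n (sum of odd numbers) and 2m(m+1)(2m+1)/3 with m=n/2 for even n (sum of even squares).
import Mathlib
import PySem

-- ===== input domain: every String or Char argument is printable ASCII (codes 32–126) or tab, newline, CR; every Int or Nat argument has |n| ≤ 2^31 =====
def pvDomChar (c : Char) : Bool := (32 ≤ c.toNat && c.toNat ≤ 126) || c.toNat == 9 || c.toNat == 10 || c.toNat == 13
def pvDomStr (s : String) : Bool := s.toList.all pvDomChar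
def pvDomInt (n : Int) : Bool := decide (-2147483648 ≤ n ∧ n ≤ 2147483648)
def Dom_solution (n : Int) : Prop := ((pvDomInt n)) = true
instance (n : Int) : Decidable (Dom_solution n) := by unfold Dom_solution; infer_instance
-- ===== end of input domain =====

-- B replaces A's O(n) accumulation loop with closed-form formulas per parity (O(1)).

-- ===== PORT A =====
-- the 'for i in range(n)' loop with state (answer, a) and the early 'break' when a+2 >= n
def solutionLoop (n : Int) : List Int → Int → Int → Int
  | [], answer, _ => answer
  | _ :: rest, answer, a =>
    let answer' := if PySem.Int.mod n 2 ≠ 0 then answer + (n - a) else answer + (n - a) ^ 2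
    let a' := a + 2
    if a' ≥ n then answer' else solutionLoop n rest answer' a'

def solution (n : Int) : Int :=
  solutionLoop n (PySem.List.pyRange 0 n 1) 0 0

-- ===== PORT B =====
def solution_alt (n : Int) : Int :=
  if n ≤ 0 then 0
  else if PySem.Int.mod n 2 ≠ 0 then
    let k := PySem.Int.floordiv (n + 1) 2
    k * k
  else
    let m := PySem.Int.floordiv n 2
    PySem.Int.floordiv (2 * m * (m + 1) * (2 * m + 1)) 3

-- ===== PRECONDITION & SPEC =====
def Spec_solution (n : Int) (out : Int) : Prop := out = solution_alt n
instance (n : Int) (out : Int) : Decidable (Spec_solution n out) := by unfold Spec_solution; infer_instance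

-- ===== CLAIM (what is proved, stated in full; the proofs are below) =====
def Claim_equal_solution : Prop := ∀ (n : Int), Dom_solution n → Spec_solution n (solution n)

-- ===== LEMMAS AND PROOFS =====

-- sum of the first m even squares, accumulated in A's order
def evenSq : Nat → Int
  | 0 => 0
  | m + 1 => evenSq m + (2 * ((m : Int) + 1)) ^ 2

theorem evenSq_three_mul (m : Nat) :
    3 * evenSq m = 2 * (m : Int) * ((m : Int) + 1) * (2 * (m : Int) + 1) := by
  induction m with
  | zero => simp [evenSq]
  | succ m ih =>
    simp only [evenSq]
    push_cast
    ring_nf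
    push_cast at ih
    linarith

theorem loop_odd (n : Int) (hm : PySem.Int.mod n 2 = 1) :
    ∀ (k : Nat) (l : List Int) (ans a : Int), 1 ≤ k → n - a = 2 * k - 1 → k ≤ l.length →
      solutionLoop n l ans a = ans + (k : Int) * k := by
  intro k
  induction k with
  | zero => intro l ans a h; omega
  | succ k ih =>
    intro l ans a _ hna hlen
    match l with
    | [] => simp at hlen
    | x :: rest =>
      simp only [solutionLoop, hm]
      norm_num
      by_cases hbr : a + 2 ≥ n
      · have hk0 : k = 0 := by omega
        subst hk0
        simp [hbr]
        omega
      · rw [if_neg hbr]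
        have hk1 : 1 ≤ k := by push_cast at hna; omega
        rw [ih rest (ans + (n - a)) (a + 2) hk1 (by push_cast at hna ⊢; omega)
            (by simp at hlen; omega)]
        push_cast at hna ⊢
        nlinarith [hna]

theorem loop_even (n : Int) (hm : PySem.Int.mod n 2 = 0) :
    ∀ (m : Nat) (l : List Int) (ans a : Int), 1 ≤ m → n - a = 2 * m → m ≤ l.length →
      solutionLoop n l ans a = ans + evenSq m := by
  intro m
  induction m with
  | zero => intro l ans a h; omega
  | succ m ih =>
    intro l ans a _ hna hlen
    match l with
    | [] => simp at hlen
    | x :: rest =>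
      simp only [solutionLoop, hm]
      norm_num
      by_cases hbr : a + 2 ≥ n
      · have hm0 : m = 0 := by omega
        subst hm0
        rw [if_pos hbr]
        have h2 : n - a = 2 := by push_cast at hna; omega
        simp [evenSq, h2]
      · rw [if_neg hbr]
        have hm1 : 1 ≤ m := by push_cast at hna; omega
        rw [ih rest (ans + (n - a) ^ 2) (a + 2) hm1 (by push_cast at hna ⊢; omega)
            (by simp at hlen; omega)]
        have hterm : n - a = 2 * ((m : Int) + 1) := by push_cast at hna ⊢; omega
        simp only [evenSq, hterm]
        ring

theorem mod_two_cases (n : Int) : PySem.Int.mod n 2 = 0 ∨ PySem.Int.mod n 2 = 1 := by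
  rw [PySem.Int.mod_eq_emod_of_pos (a:=n) (b:=2) (by norm_num)]
  omega

-- ===== VERDICT (by name: the statement is the Claim_ definition above) =====
theorem solution_spec : Claim_equal_solution := by
  intro n _
  unfold Spec_solution solution solution_alt
  by_cases hn : n ≤ 0
  · rw [if_pos hn, PySem.List.pyRange_one_eq_nil (by omega)]
    rfl
  · rw [if_neg hn]
    have hlen : (PySem.List.pyRange 0 n 1).length = n.toNat := by
      rw [PySem.List.length_pyRange_one]; congr 1; omega
    rcases mod_two_cases n with hm | hm
    · -- even, n > 0
      have hdvd : (2 : Int) ∣ n := by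
        rw [PySem.Int.mod_eq_emod_of_pos (a:=n) (b:=2) (by norm_num)] at hm; omega
      rw [if_neg (by simp [hdvd])]
      obtain ⟨m0, hm0⟩ := hdvd
      have hm0n : 0 < m0 := by omega
      have hfd : PySem.Int.floordiv n 2 = m0 := by
        rw [PySem.Int.floordiv_eq_ediv_of_pos (a:=n) (b:=2) (by norm_num)]; omega
      rw [loop_even n hm m0.toNat _ 0 0 (by omega) (by omega) (by omega)]
      have h3 : 3 * evenSq m0.toNat = 2 * m0 * (m0 + 1) * (2 * m0 + 1) := by
        have := evenSq_three_mul m0.toNat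
        rw [Int.toNat_of_nonneg (by omega)] at this
        exact this
      rw [hfd]
      rw [PySem.Int.floordiv_eq_ediv_of_pos (b:=3) (by norm_num)]
      omega
    · -- odd, n > 0
      have hodd : n % 2 = 1 := by
        rw [PySem.Int.mod_eq_emod_of_pos (a:=n) (b:=2) (by norm_num)] at hm; exact hm
      rw [if_pos (by simp [hodd])]
      obtain ⟨k0, hk0⟩ : ∃ k0 : Int, n = 2 * k0 - 1 := ⟨(n + 1) / 2, by omega⟩
      have hk0n : 0 < k0 := by omega
      have hfd : PySem.Int.floordiv (n + 1) 2 = k0 := by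
        rw [PySem.Int.floordiv_eq_ediv_of_pos (b:=2) (by norm_num)]; omega
      rw [loop_odd n hm k0.toNat _ 0 0 (by omega) (by omega) (by omega)]
      rw [hfd]
      rw [Int.toNat_of_nonneg (by omega)] at *
      push_cast
      omega
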